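-- pv_equiv track=rewrite | github.com/brianrodri/snippets | secret_santa.py | bijections_of
-- ===== SOURCE A (Python) =====
-- from collections import defaultdict
-- from itertools import product, chain
--
-- def bijections_of(collection, relations):
-- 	mapping = defaultdict(list)
-- 	bijections = []
--
-- 	for lhs, rhs in relations:
-- 		if lhs in set(collection) and rhs in set(collection):
-- 			mapping[lhs].append(rhs)
--
-- 	if len(mapping) != len(collection) or len(set(chain.from_iterable(mapping.values()))) != len(collection):
-- 		return []
--
-- 	for rhs_permutation in (list(rhs_values) for rhs_values in product(*mapping.values())):
-- 		if len(set(rhs_permutation)) == len(collection):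
-- 			bijections.append(list(zip(mapping.keys(), rhs_permutation)))
--
-- 	return bijections
-- ===== SOURCE B (Python) =====
-- def bijections_of(collection, relations):
--     pairs = [(lhs, rhs) for lhs, rhs in relations
--              if lhs in collection and rhs in collection]
--     keys = list(dict.fromkeys(lhs for lhs, _ in pairs))
--     n = len(collection)
--     if len(keys) != n or len({rhs for _, rhs in pairs}) != n:
--         return []
--
--     def assign(ks, used):
--         if not ks:
--             return [[]]
--         k = ks[0]
--         out = []
--         for _, rhs in (p for p in pairs if p[0] == k):
--             if rhs not in used:
--                 out.extend([(k, rhs)] + tail for tail in assign(ks[1:], [rhs] + used))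
--         return out
--
--     return assign(keys, [])
-- ===== Notes on version B (the rewrite author's own statement) =====
-- stated objective: faster
-- what changed: Replaces A's dict-grouping pass and full cartesian product of all rhs choices followed by a distinctness filter with a filtered pair list, an ordered key dedup, and a recursive per-key assignment that skips rhs values already used, pruning non-injective branches early.
import Mathlib
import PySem

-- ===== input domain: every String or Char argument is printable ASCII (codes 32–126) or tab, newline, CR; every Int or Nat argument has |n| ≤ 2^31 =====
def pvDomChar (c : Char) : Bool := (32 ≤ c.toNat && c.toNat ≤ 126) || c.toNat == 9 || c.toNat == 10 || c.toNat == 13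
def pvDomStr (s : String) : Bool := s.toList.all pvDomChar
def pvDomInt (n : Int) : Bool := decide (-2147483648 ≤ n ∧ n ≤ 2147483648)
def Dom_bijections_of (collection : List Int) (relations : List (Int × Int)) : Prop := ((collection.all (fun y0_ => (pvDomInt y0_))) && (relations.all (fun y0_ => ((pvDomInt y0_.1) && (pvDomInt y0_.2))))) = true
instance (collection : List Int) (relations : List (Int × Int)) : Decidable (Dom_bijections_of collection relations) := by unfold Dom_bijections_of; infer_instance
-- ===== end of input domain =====

-- B replaces A's dict-grouping pass and full cartesian product + distinctness filter by a
-- filtered pair list, an ordered key dedup, and a recursive per-key assignment that skips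
-- already-used values (objective: faster — non-injective branches are pruned early).

-- ===== PORT A =====
-- itertools.product(*lists), as the generator of all choice tuples in product order
def pvProduct : List (List Int) → List (List Int)
  | [] => [[]]
  | vs :: rest => vs.flatMap (fun v => (pvProduct rest).map (fun p => v :: p))

-- the defaultdict(list) built by A's first loop
def pvMappingOf (collection : List Int) (relations : List (Int × Int)) : PySem.Dict Int (List Int) :=
  relations.foldl
    (fun d lr =>
      if (PySem.Set.ofList collection).contains lr.1 && (PySem.Set.ofList collection).contains lr.2 then
        d.modify lr.1 [] (fun vs => vs ++ [lr.2])
      else d)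
    PySem.Dict.empty

def bijections_of (collection : List Int) (relations : List (Int × Int)) : List (List (Int × Int)) :=
  if (pvMappingOf collection relations).keys.length ≠ collection.length ∨
     (PySem.Set.ofList ((pvMappingOf collection relations).values.flatMap (fun vs => vs))).length ≠ collection.length then
    []
  else
    (pvProduct (pvMappingOf collection relations).values).foldl
      (fun bijections p =>
        if (PySem.Set.ofList p).length = collection.length then
          bijections ++ [(pvMappingOf collection relations).keys.zip p]
        else bijections)
      []

-- ===== PORT B =====
-- B's recursive assignment: for each remaining key in turn, try its rhs values (read off the
-- filtered pair list), skip the ones on the used list, and cons (key, rhs) onto every tail.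
def pvAssign (pairs : List (Int × Int)) : List Int → List Int → List (List (Int × Int))
  | [], _ => [[]]
  | k :: ks, used =>
    ((pairs.filter (fun p => p.1 == k)).map (fun p => p.2)).flatMap (fun rhs =>
      if used.contains rhs then []
      else (pvAssign pairs ks (rhs :: used)).map (fun tail => (k, rhs) :: tail))

def bijections_of_alt (collection : List Int) (relations : List (Int × Int)) : List (List (Int × Int)) :=
  let pairs := relations.filter (fun p => collection.contains p.1 && collection.contains p.2)
  let keys := PySem.List.dedup (pairs.map (fun p => p.1))
  if keys.length ≠ collection.length ∨
     (PySem.Set.ofList (pairs.map (fun p => p.2))).length ≠ collection.length then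
    []
  else
    pvAssign pairs keys []

-- ===== PRECONDITION & SPEC =====
def Spec_bijections_of (collection : List Int) (relations : List (Int × Int)) (out : List (List (Int × Int))) : Prop := out = bijections_of_alt collection relations
instance (collection : List Int) (relations : List (Int × Int)) (out : List (List (Int × Int))) : Decidable (Spec_bijections_of collection relations out) := by unfold Spec_bijections_of; infer_instance

-- ===== CLAIM (what is proved, stated in full; the proofs are below) =====
def Claim_equal_bijections_of : Prop := ∀ (collection : List Int) (relations : List (Int × Int)), Dom_bijections_of collection relations → Spec_bijections_of collection relations (bijections_of collection relations)

-- ===== LEMMAS AND PROOFS =====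

-- membership in set(collection) is membership in collection
lemma pvContains_ofList (c : List Int) (x : Int) :
    (PySem.Set.ofList c).contains x = c.contains x := by
  by_cases h : x ∈ c <;> simp [PySem.Set.mem_ofList, h]

-- A's guarded fold over relations is the unguarded fold over B's filtered pairs
lemma pvMappingOf_eq_foldl_filter (c : List Int) (rel : List (Int × Int)) :
    pvMappingOf c rel =
      (rel.filter (fun p => c.contains p.1 && c.contains p.2)).foldl
        (fun d lr => d.modify lr.1 [] (fun vs => vs ++ [lr.2])) PySem.Dict.empty := by
  unfold pvMappingOf
  rw [List.foldl_filter]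
  simp only [pvContains_ofList]

-- every tuple produced by the product has one entry per value list
lemma pvProduct_length (values : List (List Int)) :
    ∀ p ∈ pvProduct values, p.length = values.length := by
  induction values with
  | nil => simp [pvProduct]
  | cons vs rest ih =>
    intro p hp
    simp only [pvProduct, List.mem_flatMap, List.mem_map] at hp
    obtain ⟨v, _, q, hq, rfl⟩ := hp
    simp [ih q hq]

-- len(set(p)) == len(p) exactly on duplicate-free lists
lemma pvLen_ofList_eq_iff (xs : List Int) :
    (PySem.Set.ofList xs).length = xs.length ↔ xs.Nodup := by
  induction xs using List.reverseRecOn with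
  | nil => simp [PySem.Set.ofList_nil]
  | append_singleton xs x ih =>
    have hnd : (xs ++ [x]).Nodup ↔ xs.Nodup ∧ x ∉ xs := by
      rw [List.nodup_middle]; simp [List.nodup_cons, and_comm]
    have hle := PySem.Set.length_ofList_le xs
    rw [PySem.Set.ofList_append_singleton, PySem.Set.add_eq_ite, hnd]
    by_cases hx : x ∈ PySem.Set.ofList xs
    · have hmem : x ∈ xs := (PySem.Set.mem_ofList xs x).mp hx
      rw [if_pos hx]
      simp only [List.length_append, List.length_singleton]
      constructor
      · intro h; omega
      · rintro ⟨-, h⟩; exact absurd hmem h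
    · have hmem : x ∉ xs := fun h => hx ((PySem.Set.mem_ofList xs x).mpr h)
      rw [if_neg hx]
      simp only [List.length_append, List.length_singleton]
      constructor
      · intro h; exact ⟨ih.mp (by omega), hmem⟩
      · rintro ⟨h, -⟩; have := ih.mpr h; omega

-- sets of two permuted lists have the same size
lemma pvLen_ofList_perm {xs ys : List Int} (h : xs.Perm ys) :
    (PySem.Set.ofList xs).length = (PySem.Set.ofList ys).length := by
  apply List.Perm.length_eq
  apply (List.perm_ext_iff_of_nodup (PySem.Set.nodup_ofList xs) (PySem.Set.nodup_ofList ys)).mpr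
  intro a
  rw [PySem.Set.mem_ofList, PySem.Set.mem_ofList]
  exact ⟨fun hm => h.mem_iff.mp hm, fun hm => h.mem_iff.mpr hm⟩

-- grouping a pair list by its (duplicate-free, covering) key list permutes the rhs column
lemma pvFlatMap_groups_perm (keys : List Int) (pairs : List (Int × Int))
    (hnd : keys.Nodup) (hcov : ∀ p ∈ pairs, p.1 ∈ keys) :
    (keys.flatMap (fun k => (pairs.filter (fun p => p.1 == k)).map (fun p => p.2))).Perm
      (pairs.map (fun p => p.2)) := by
  induction keys generalizing pairs with
  | nil =>
    have : pairs = [] := by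
      cases pairs with
      | nil => rfl
      | cons p ps => exact absurd (hcov p (List.mem_cons_self)) (List.not_mem_nil)
    simp [this]
  | cons k ks ih =>
    rw [List.flatMap_cons]
    have hrest : ∀ k' ∈ ks, pairs.filter (fun p => p.1 == k')
        = (pairs.filter (fun p => !(p.1 == k))).filter (fun p => p.1 == k') := by
      intro k' hk'
      rw [List.filter_filter]
      apply List.filter_congr
      intro p _
      by_cases h : p.1 = k'
      · have hne : k' ≠ k := fun hh => (List.nodup_cons.mp hnd).1 (hh ▸ hk')
        simp [h, hne]
      · simp [h]
    have hmapcong : ks.flatMap (fun k' => (pairs.filter (fun p => p.1 == k')).map (fun p => p.2))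
        = ks.flatMap (fun k' => ((pairs.filter (fun p => !(p.1 == k))).filter (fun p => p.1 == k')).map (fun p => p.2)) := by
      apply List.flatMap_congr
      intro k' hk'
      rw [hrest k' hk']
    rw [hmapcong]
    have hcov' : ∀ p ∈ pairs.filter (fun p => !(p.1 == k)), p.1 ∈ ks := by
      intro p hp
      rcases List.mem_filter.mp hp with ⟨hmem, hne⟩
      rcases List.mem_cons.mp (hcov p hmem) with h | h
      · exfalso; simp [h] at hne
      · exact h
    have ihp := ih (pairs.filter (fun p => !(p.1 == k))) (List.nodup_cons.mp hnd).2 hcov'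
    refine (List.Perm.append_left _ ihp).trans ?_
    rw [← List.map_append]
    exact List.Perm.map _ (List.filter_append_perm _ pairs)

-- B's recursion enumerates exactly the duplicate-free, unused-valued product tuples, in product order
lemma pvAssign_eq (pairs : List (Int × Int)) (ks : List Int) (used : List Int) :
    pvAssign pairs ks used =
      ((pvProduct (ks.map (fun k => (pairs.filter (fun p => p.1 == k)).map (fun p => p.2)))).filter
        (fun p => decide (p.Nodup ∧ ∀ x ∈ p, x ∉ used))).map
        (fun p => ks.zip p) := by
  induction ks generalizing used with
  | nil => simp [pvAssign, pvProduct]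
  | cons k ks ih =>
    simp only [pvAssign, List.map_cons, pvProduct, List.filter_flatMap, List.filter_map, List.map_flatMap]
    refine List.flatMap_congr (fun r _ => ?_)
    by_cases hr : used.contains r
    · have hrmem : r ∈ used := by simpa using hr
      have hnil : List.filter
          ((fun p : List Int => decide (p.Nodup ∧ ∀ x ∈ p, x ∉ used)) ∘ (fun p => r :: p))
          (pvProduct (ks.map (fun k => (pairs.filter (fun p => p.1 == k)).map (fun p => p.2)))) = [] := by
        apply List.filter_eq_nil_iff.mpr
        intro q _
        simp only [Function.comp_apply, decide_eq_true_eq, not_and]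
        exact fun _ hall => (hall r (List.mem_cons_self)) hrmem
      rw [if_pos hr, hnil]; simp
    · have hrmem : r ∉ used := by simpa using hr
      rw [if_neg hr, ih]
      have hpred : ∀ q ∈ pvProduct (ks.map (fun k => (pairs.filter (fun p => p.1 == k)).map (fun p => p.2))),
          (decide (q.Nodup ∧ ∀ x ∈ q, x ∉ (r :: used))) =
            ((fun p : List Int => decide (p.Nodup ∧ ∀ x ∈ p, x ∉ used)) ∘ (fun p => r :: p)) q := by
        intro q _
        simp only [Function.comp_apply, decide_eq_decide, List.nodup_cons, List.mem_cons]
        constructor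
        · rintro ⟨hnd, hall⟩
          refine ⟨⟨fun h => (hall r h) (Or.inl rfl), hnd⟩, ?_⟩
          rintro x (rfl | hx)
          · exact hrmem
          · exact fun h => (hall x hx) (Or.inr h)
        · rintro ⟨⟨hnr, hnd⟩, hall⟩
          refine ⟨hnd, fun x hx h => ?_⟩
          rcases h with rfl | h'
          · exact hnr hx
          · exact (hall x (Or.inr hx)) h'
      rw [List.filter_congr hpred]
      simp [Function.comp]

-- ===== VERDICT (by name: the statement is the Claim_ definition above) =====
theorem bijections_of_spec : Claim_equal_bijections_of := by
  intro collection relations _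
  unfold Spec_bijections_of bijections_of bijections_of_alt
  set pairs := relations.filter (fun p => collection.contains p.1 && collection.contains p.2) with hpairs
  set mapping := pvMappingOf collection relations with hm
  have hmfold : mapping = pairs.foldl
      (fun d lr => d.modify lr.1 [] (fun vs => vs ++ [lr.2])) PySem.Dict.empty :=
    pvMappingOf_eq_foldl_filter collection relations
  -- keys of the dict = B's ordered dedup of the lhs column
  have hkeys : mapping.keys = PySem.List.dedup (pairs.map (fun p => p.1)) := by
    rw [hmfold]
    have h := PySem.Dict.keys_foldl_modify_key pairs (fun p : Int × Int => p.1) ([] : List Int)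
      (fun _ lr vs => vs ++ [lr.2]) PySem.Dict.empty
    simpa [PySem.Dict.keys_empty, PySem.Set.update, PySem.Set.ofList_eq_foldl] using h
  have hknd : mapping.keys.Nodup := by
    rw [hkeys]
    exact PySem.List.nodup_dedup _
  -- values of the dict = per-key rhs groups, in key order
  have hgetD : ∀ k, mapping.getD k [] = (pairs.filter (fun p => p.1 == k)).map (fun p => p.2) := by
    intro k
    rw [hmfold, PySem.Dict.getD_foldl_modify_append]
    simp [PySem.Dict.getD_empty]
  have hvals : mapping.values
      = mapping.keys.map (fun k => (pairs.filter (fun p => p.1 == k)).map (fun p => p.2)) := by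
    rw [PySem.Dict.values_eq_map_keys mapping hknd []]
    exact List.map_congr_left (fun k _ => hgetD k)
  -- the two guards agree
  have hcov : ∀ p ∈ pairs, p.1 ∈ mapping.keys := by
    intro p hp
    rw [hkeys]
    exact (PySem.List.mem_dedup _ _).mpr (List.mem_map_of_mem hp)
  have hflat : (mapping.values.flatMap (fun vs => vs)).Perm (pairs.map (fun p => p.2)) := by
    rw [hvals, List.flatMap_map]
    exact pvFlatMap_groups_perm mapping.keys pairs hknd hcov
  have hguard2 : (PySem.Set.ofList (mapping.values.flatMap (fun vs => vs))).length
      = (PySem.Set.ofList (pairs.map (fun p => p.2))).length := pvLen_ofList_perm hflat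
  have hklen : mapping.keys.length = (PySem.List.dedup (pairs.map (fun p => p.1))).length := by
    rw [hkeys]
  by_cases hguard : mapping.keys.length ≠ collection.length ∨
      (PySem.Set.ofList (mapping.values.flatMap (fun vs => vs))).length ≠ collection.length
  · rw [if_pos hguard, if_pos (by rw [← hklen, ← hguard2]; exact hguard)]
  · rw [if_neg hguard, if_neg (by rw [← hklen, ← hguard2]; exact hguard)]
    rw [not_or, not_ne_iff] at hguard
    obtain ⟨hk, -⟩ := hguard
    rw [pvAssign_eq, ← hkeys, ← hvals]
    have hfilter : List.filter (fun p => decide (p.Nodup ∧ ∀ x ∈ p, x ∉ ([] : List Int)))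
          (pvProduct mapping.values)
        = List.filter (fun p => decide ((PySem.Set.ofList p).length = collection.length))
          (pvProduct mapping.values) := by
      apply List.filter_congr
      intro p hp
      have hlen : p.length = collection.length := by
        rw [pvProduct_length mapping.values p hp, hvals, List.length_map, hk]
      simp only [decide_eq_decide]
      rw [← hlen, pvLen_ofList_eq_iff]
      constructor
      · rintro ⟨h, -⟩; exact h
      · intro h; exact ⟨h, fun x _ hx => List.not_mem_nil hx⟩
    rw [hfilter]
    have hfold : (fun (bijections : List (List (Int × Int))) (p : List Int) =>
          if (PySem.Set.ofList p).length = collection.length then bijections ++ [mapping.keys.zip p]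
          else bijections)
        = (fun bijections p =>
          if (fun p => decide ((PySem.Set.ofList p).length = collection.length)) p = true then
            bijections ++ [(fun p => mapping.keys.zip p) p]
          else bijections) := by
      funext b p; simp
    rw [hfold, PySem.List.foldl_append_if]
    simp
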